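-- pv_equiv track=rewrite | github.com/chobojajg/codequiz | 프로그래머스/0/181918. 배열 만들기 4/배열 만들기 4.py | solution
-- ===== SOURCE A (Python) =====
-- def solution(arr):
--     stk = []
--     while len(arr):
--         a = arr.index(min(arr))
--         if arr[a] in stk:
--             stk.pop()
--         stk.append(arr.pop(a))
--         arr = arr[a:]
--
--     return stk
-- ===== SOURCE B (Python) =====
-- def solution(arr):
--     # One right-to-left pass: keep the strict running minima (suffix minima),
--     # then reverse to get them in increasing order.
--     out = []
--     cur = None
--     for x in reversed(arr):
--         if cur is None or x < cur:
--             cur = x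
--             out.append(x)
--     out.reverse()
--     return out
-- ===== Notes on version B (the rewrite author's own statement) =====
-- stated objective: faster
-- what changed: Replaced the repeated min/index/pop/slice passes over the shrinking list with a single right-to-left scan that records strict running minima (the suffix minima) and reverses the record list.
import Mathlib
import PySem

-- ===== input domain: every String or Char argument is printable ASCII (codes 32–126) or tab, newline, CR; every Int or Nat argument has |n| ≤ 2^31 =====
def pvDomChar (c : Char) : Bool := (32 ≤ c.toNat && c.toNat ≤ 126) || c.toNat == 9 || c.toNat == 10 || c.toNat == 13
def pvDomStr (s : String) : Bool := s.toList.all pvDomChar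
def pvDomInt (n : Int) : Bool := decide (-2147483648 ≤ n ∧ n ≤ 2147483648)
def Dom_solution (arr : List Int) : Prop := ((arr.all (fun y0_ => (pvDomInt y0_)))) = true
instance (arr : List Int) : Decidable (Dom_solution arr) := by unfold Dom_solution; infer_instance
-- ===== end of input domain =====

-- B replaces A's quadratic min/index/pop/slice loop with one right-to-left pass
-- collecting strict running minima (objective: faster; note A pops one element
-- from the caller's list in place, B does not mutate — equivalence is about the return value).


-- ===== PORT A =====
-- the while loop of A: state (arr, stk); each step finds the first minimum,
-- dedups the stack top, appends the popped minimum, and keeps arr[a:]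
def solGoA (arr stk : List Int) : List Int :=
  if _h : arr = [] then stk
  else
    match PySem.List.min? arr (fun x => x) with
    | none => stk                      -- unreachable: arr ≠ []
    | some m =>
      match PySem.List.index? arr m with
      | none => stk                    -- unreachable: m ∈ arr
      | some a =>
        let stk1 :=
          match PySem.List.pyGet? arr (a : Int) with
          | none => stk                -- unreachable: a in range
          | some v =>
            if v ∈ stk then
              match PySem.List.pop? stk (-1) with   -- stk.pop()
              | some (_, s) => s
              | none => stk            -- unreachable: v ∈ stk so stk ≠ []
            else stk
        match _hpop : PySem.List.pop? arr (a : Int) with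
        | none => stk1                 -- unreachable: a in range
        | some (v, arr2) =>
          solGoA (PySem.List.slice arr2 (some (a : Int)) none) (stk1 ++ [v])
termination_by arr.length
decreasing_by
  have h2 : arr2.length + 1 = arr.length := by
    simpa using PySem.List.length_of_pop?_eq_some arr _hpop
  rw [PySem.List.slice_from_natCast]
  simp only [List.length_drop]
  omega

def solution (arr : List Int) : List Int := solGoA arr []

-- ===== PORT B =====
def solution_alt (arr : List Int) : List Int :=
  let st := arr.reverse.foldl
    (fun (st : List Int × Option Int) x =>
      match st.2 with
      | none => (st.1 ++ [x], some x)
      | some c => if x < c then (st.1 ++ [x], some x) else st)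
    ([], none)
  st.1.reverse

-- ===== PRECONDITION & SPEC =====
def Spec_solution (arr : List Int) (out : List Int) : Prop := out = solution_alt arr
instance (arr : List Int) (out : List Int) : Decidable (Spec_solution arr out) := by unfold Spec_solution; infer_instance

-- ===== CLAIM (what is proved, stated in full; the proofs are below) =====
def Claim_equal_solution : Prop := ∀ (arr : List Int), Dom_solution arr → Spec_solution arr (solution arr)

-- ===== LEMMAS AND PROOFS =====

-- the common recursive description: keep x iff x is strictly below everything to its right
def fRec : List Int → List Int
  | [] => []
  | x :: xs =>
    let r := fRec xs
    match r.head? with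
    | none => [x]
    | some h => if x < h then x :: r else r

-- drop a leading t
def rstrip (t? : Option Int) (l : List Int) : List Int :=
  match t? with
  | none => l
  | some t => if l.head? = some t then l.tail else l

lemma fRec_head_min : ∀ (xs : List Int), xs ≠ [] →
    ∃ h, (fRec xs).head? = some h ∧ h ∈ xs ∧ ∀ x ∈ xs, h ≤ x := by
  intro xs
  induction xs with
  | nil => intro h; exact absurd rfl h
  | cons x xs ih =>
    intro _
    by_cases hx : xs = []
    · subst hx
      exact ⟨x, by simp [fRec], by simp, by simp⟩
    · obtain ⟨h, hh, hmem, hle⟩ := ih hx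
      by_cases hlt : x < h
      · refine ⟨x, ?_, by simp, ?_⟩
        · simp only [fRec, hh, if_pos hlt, List.head?_cons]
        · intro y hy
          rcases List.mem_cons.mp hy with rfl | hy
          · exact le_refl y
          · exact le_of_lt (lt_of_lt_of_le hlt (hle y hy))
      · refine ⟨h, ?_, List.mem_cons_of_mem _ hmem, ?_⟩
        · simp only [fRec, hh, if_neg hlt]
        · intro y hy
          rcases List.mem_cons.mp hy with rfl | hy
          · exact le_of_not_gt (by simpa using hlt)
          · exact hle y hy

lemma fRec_split : ∀ (pre : List Int) (m : Int) (suf : List Int),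
    (∀ y ∈ pre, m < y) → (∀ x ∈ suf, m ≤ x) →
    fRec (pre ++ m :: suf) = m :: rstrip (some m) (fRec suf) := by
  intro pre
  induction pre with
  | nil =>
    intro m suf _ hsuf
    by_cases hs : suf = []
    · subst hs; simp [fRec, rstrip]
    · obtain ⟨h, hh, hmem, _⟩ := fRec_head_min suf hs
      have hmh : m ≤ h := hsuf h hmem
      by_cases hlt : m < h
      · have hne : h ≠ m := by omega
        simp only [List.nil_append, fRec, hh, if_pos hlt, rstrip]
        simp [hne]
      · have hme : h = m := le_antisymm (le_of_not_gt (by simpa using hlt)) hmh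
        subst hme
        have hcons : fRec suf = h :: (fRec suf).tail := by
          cases hfs : fRec suf with
          | nil => rw [hfs] at hh; simp at hh
          | cons a t => rw [hfs] at hh; injection hh with hh; subst hh; rfl
        simp only [List.nil_append, fRec, hh, if_neg hlt, rstrip]
        simpa using hcons
  | cons y pre ih =>
    intro m suf hpre hsuf
    have hrest := ih m suf (fun z hz => hpre z (List.mem_cons_of_mem _ hz)) hsuf
    have hne : pre ++ m :: suf ≠ [] := by simp
    obtain ⟨h, hh, _, hle⟩ := fRec_head_min (pre ++ m :: suf) hne
    have hm : h ≤ m := hle m (by simp)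
    have hym : m < y := hpre y (List.mem_cons_self)
    have hnlt : ¬ y < h := by omega
    show fRec (y :: (pre ++ m :: suf)) = m :: rstrip (some m) (fRec suf)
    simp only [fRec, hh, if_neg hnlt]
    exact hrest

lemma eraseIdx_append_cons : ∀ (pre : List Int) (m : Int) (suf : List Int),
    (pre ++ m :: suf).eraseIdx pre.length = pre ++ suf := by
  intro pre m suf
  induction pre with
  | nil => rfl
  | cons y pre ih => simpa [List.eraseIdx] using ih

lemma getElem_append_cons (pre : List Int) (m : Int) (suf : List Int)
    (h : pre.length < (pre ++ m :: suf).length) :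
    (pre ++ m :: suf)[pre.length] = m := by
  rw [List.getElem_append_right (le_refl pre.length)]
  simp

-- the main invariant of A's loop: stk is a strictly increasing record list whose
-- last element is at most everything still in arr
lemma go_main : ∀ (n : Nat) (arr stk : List Int), arr.length ≤ n →
    (∀ y ∈ stk.dropLast, ∀ x ∈ arr, y < x) →
    (∀ t, stk.getLast? = some t → ∀ x ∈ arr, t ≤ x) →
    solGoA arr stk = stk ++ rstrip stk.getLast? (fRec arr) := by
  intro n
  induction n with
  | zero =>
    intro arr stk hlen _ _
    have : arr = [] := List.length_eq_zero_iff.mp (Nat.le_zero.mp hlen)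
    subst this
    rw [solGoA.eq_def]
    cases h : stk.getLast? <;> simp [fRec, rstrip]
  | succ n ih =>
    intro arr stk hlen hpre hlast
    by_cases harr : arr = []
    · subst harr
      rw [solGoA.eq_def]
      cases h : stk.getLast? <;> simp [fRec, rstrip]
    · -- decompose the step
      obtain ⟨m, hm⟩ := Option.ne_none_iff_exists'.mp
        (fun hc => harr ((PySem.List.min?_eq_none_iff arr (fun x => x)).mp hc))
      have hmmem : m ∈ arr := PySem.List.min?_mem hm
      have hmmin : ∀ x ∈ arr, m ≤ x := by
        intro x hx; exact PySem.List.min?_isMin (key := fun x => x) hm x hx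
      obtain ⟨a, ha⟩ := Option.isSome_iff_exists.mp
        ((PySem.List.index?_isSome_iff arr m).mpr hmmem)
      obtain ⟨pre, suf, hsplit, hplen, hnotin⟩ :=
        (PySem.List.index?_eq_some_iff arr m a).mp ha
      have hprelt : ∀ y ∈ pre, m < y := by
        intro y hy
        have : m ≤ y := hmmin y (by rw [hsplit]; exact List.mem_append_left _ hy)
        rcases lt_or_eq_of_le this with h | h
        · exact h
        · exact absurd (h ▸ hy) hnotin
      have hsuf : ∀ x ∈ suf, m ≤ x := by
        intro x hx; exact hmmin x (by rw [hsplit]; simp [hx])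
      have hget : PySem.List.pyGet? arr (a : Int) = some m := by
        rw [hsplit, ← hplen]; exact PySem.List.pyGet?_append_length pre suf m
      have haLt : a < arr.length := by rw [hsplit, ← hplen]; simp
      have hpop : PySem.List.pop? arr (a : Int) = some (m, pre ++ suf) := by
        rw [PySem.List.pop?_natCast arr a haLt]
        congr 1
        refine Prod.ext ?_ ?_
        · show arr[a] = m
          subst hsplit hplen; exact getElem_append_cons pre m suf haLt
        · show arr.eraseIdx a = pre ++ suf
          subst hsplit hplen; exact eraseIdx_append_cons pre m suf
      have hslice : PySem.List.slice (pre ++ suf) (some (a : Int)) none = suf := by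
        rw [PySem.List.slice_from_natCast, ← hplen]
        exact List.drop_left
      have harglen : suf.length ≤ n := by
        have : arr.length = pre.length + 1 + suf.length := by rw [hsplit]; simp; omega
        omega
      -- membership of m in stk ↔ m is the last element
      have hmem_iff : (m ∈ stk) ↔ stk.getLast? = some m := by
        constructor
        · intro hms
          cases hstk : stk.getLast? with
          | none =>
            have : stk = [] := List.getLast?_eq_none_iff.mp hstk
            subst this; simp at hms
          | some t =>
            have hstk' : stk = stk.dropLast ++ [t] :=
              (List.dropLast_append_getLast? t hstk).symm
            rcases List.mem_append.mp (hstk' ▸ hms) with hd | hl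
            · exact absurd (hpre m hd m hmmem) (lt_irrefl m)
            · simp [List.mem_singleton.mp hl]
        · intro ht
          rw [← List.dropLast_append_getLast? m ht]
          exact List.mem_append_right _ (by simp)
      -- the invariant for the recursive call, for either next stack s1 ++ [m]
      -- evaluate one unfolding of solGoA
      rw [solGoA.eq_def]
      simp only [dif_neg harr, hm, ha, hget]
      by_cases hms : m ∈ stk
      · -- dedup case: pop the last element (= m) and push m back: stack unchanged
        have hlastm : stk.getLast? = some m := hmem_iff.mp hms
        have hstk' : stk = stk.dropLast ++ [m] :=
          (List.dropLast_append_getLast? m hlastm).symm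
        have hpopstk : PySem.List.pop? stk (-1) = some (m, stk.dropLast) := by
          conv_lhs => rw [hstk']
          exact PySem.List.pop?_last stk.dropLast m
        simp only [if_pos hms, hpopstk]
        split
        · next heq => rw [hpop] at heq; cases heq
        · next v arr2 heq =>
          rw [hpop] at heq
          injection heq with heq
          obtain ⟨rfl, rfl⟩ := Prod.mk.injEq .. ▸ And.intro (congrArg Prod.fst heq) (congrArg Prod.snd heq)
          have hrec := ih suf (stk.dropLast ++ [m])
            harglen
            (by
              simp only [List.dropLast_concat]
              intro y hy x hx
              exact lt_of_lt_of_le (hpre y (by rw [hstk']; simp [hy]) m hmmem) (hsuf x hx))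
            (by
              intro t htl x hx
              rw [List.getLast?_concat] at htl
              injection htl with htl
              rw [← htl]; exact hsuf x hx)
          simp only [List.append_eq]
          rw [hslice, hrec, List.getLast?_concat]
          rw [hsplit, fRec_split pre m suf hprelt hsuf]
          conv_rhs => rw [hstk']
          simp [rstrip]
      · -- fresh minimum: push it
        simp only [if_neg hms]
        have hlastne : stk.getLast? ≠ some m := fun hc => hms (hmem_iff.mpr hc)
        split
        · next heq => rw [hpop] at heq; cases heq
        · next v arr2 heq =>
          rw [hpop] at heq
          injection heq with heq
          obtain ⟨rfl, rfl⟩ := Prod.mk.injEq .. ▸ And.intro (congrArg Prod.fst heq) (congrArg Prod.snd heq)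
          have hrec := ih suf (stk ++ [m])
            harglen
            (by
              simp only [List.dropLast_concat]
              intro y hy x hx
              cases hstk : stk.getLast? with
              | none =>
                have : stk = [] := List.getLast?_eq_none_iff.mp hstk
                subst this; simp at hy
              | some t =>
                have hstk' : stk = stk.dropLast ++ [t] :=
                  (List.dropLast_append_getLast? t hstk).symm
                rcases List.mem_append.mp (hstk' ▸ hy) with hd | hl
                · exact lt_of_lt_of_le (hpre y hd m hmmem) (hsuf x hx)
                · rw [List.mem_singleton.mp hl]
                  have h1 : t ≤ m := hlast t hstk m hmmem
                  have h2 : t ≠ m := fun hc => hlastne (hc ▸ hstk)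
                  exact lt_of_lt_of_le (lt_of_le_of_ne h1 h2) (hsuf x hx))
            (by
              intro t htl x hx
              rw [List.getLast?_concat] at htl
              injection htl with htl
              rw [← htl]; exact hsuf x hx)
          simp only [List.append_eq]
          rw [hslice, hrec, List.getLast?_concat]
          rw [hsplit, fRec_split pre m suf hprelt hsuf]
          have hkeep : rstrip stk.getLast? (m :: rstrip (some m) (fRec suf)) =
              m :: rstrip (some m) (fRec suf) := by
            cases hstk : stk.getLast? with
            | none => rfl
            | some t =>
              have hmt : ¬ m = t := fun hc => hlastne (by rw [hstk, ← hc])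
              simp [rstrip, hmt]
          rw [hkeep]
          simp [rstrip]

lemma solution_eq_fRec (arr : List Int) : solution arr = fRec arr := by
  unfold solution
  rw [go_main arr.length arr [] (le_refl _) (by simp) (by simp)]
  simp [rstrip]

lemma alt_fold (arr : List Int) :
    arr.reverse.foldl
      (fun (st : List Int × Option Int) x =>
        match st.2 with
        | none => (st.1 ++ [x], some x)
        | some c => if x < c then (st.1 ++ [x], some x) else st)
      ([], none) = ((fRec arr).reverse, (fRec arr).head?) := by
  induction arr with
  | nil => simp [fRec]
  | cons x xs ih =>
    rw [List.reverse_cons, List.foldl_append, ih]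
    simp only [List.foldl_cons, List.foldl_nil]
    cases hh : (fRec xs).head? with
    | none =>
      have hnil : fRec xs = [] := List.head?_eq_none_iff.mp hh
      simp [fRec, hnil]
    | some h =>
      by_cases hlt : x < h
      · simp [fRec, hh, hlt]
      · simp [fRec, hh, hlt]

lemma solution_alt_eq_fRec (arr : List Int) : solution_alt arr = fRec arr := by
  unfold solution_alt
  rw [alt_fold]
  simp

-- ===== VERDICT (by name: the statement is the Claim_ definition above) =====
theorem solution_spec : Claim_equal_solution := by
  intro arr _
  unfold Spec_solution
  rw [solution_eq_fRec, solution_alt_eq_fRec]
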